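-- pv_equiv track=rewrite | github.com/Famondir/flat-location-rater | flask-react-app/backend/geo_data_handler.py | aggregate_identical_flats
-- ===== SOURCE A (Python) =====
-- def aggregate_identical_flats(flat_positions):
--     flats_to_delete = set()
--     new_entries = {}
--
--     # Compare all pairs
--     for key1, val1 in flat_positions.items():
--         if key1 in flats_to_delete:
--             continue
--         for key2, val2 in flat_positions.items():
--             if key1 >= key2 or key2 in flats_to_delete:
--                 continue
--             if val1 == val2:
--                 # Create combined entry
--                 new_key = f"{key1}+{key2}"
--                 new_entries[new_key] = val1
--                 flats_to_delete.add(key1)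
--                 flats_to_delete.add(key2)
--
--     # Remove old entries and add new ones
--     for key in flats_to_delete:
--         del flat_positions[key]
--     flat_positions.update(new_entries)
--
--     return flat_positions
-- ===== SOURCE B (Python) =====
-- def aggregate_identical_flats(flat_positions):
--     # Faster re-implementation: one hash-map pass groups keys by value, so the
--     # quadratic all-pairs scan of the original only runs inside each group.
--     # (The original mutates its argument in place; this returns a fresh dict
--     # with the same contents.)
--     items = list(flat_positions.items())
--
--     # value -> keys carrying that value, in insertion order
--     groups = {}
--     for key, val in items:
--         groups.setdefault(val, []).append(key)
--
--     consumed = set()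
--     new_entries = []
--     for key1, val in items:
--         if key1 in consumed:
--             continue
--         partners = [k2 for k2 in groups[val] if k2 not in consumed and k2 > key1]
--         if partners:
--             consumed.add(key1)
--             for k2 in partners:
--                 consumed.add(k2)
--                 new_entries.append((key1 + "+" + k2, val))
--
--     result = {k: v for k, v in items if k not in consumed}
--     for new_key, val in new_entries:
--         result[new_key] = val
--     return result
-- ===== Notes on version B (the rewrite author's own statement) =====
-- stated objective: faster
-- what changed: A value->keys hash index built in one pass replaces the inner scan over the whole dict, so candidate partners for each key are looked up within its equal-value group only; surviving entries are kept by a single filter pass and the combined entries are collected in a list instead of a second dict.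
import Mathlib
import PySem

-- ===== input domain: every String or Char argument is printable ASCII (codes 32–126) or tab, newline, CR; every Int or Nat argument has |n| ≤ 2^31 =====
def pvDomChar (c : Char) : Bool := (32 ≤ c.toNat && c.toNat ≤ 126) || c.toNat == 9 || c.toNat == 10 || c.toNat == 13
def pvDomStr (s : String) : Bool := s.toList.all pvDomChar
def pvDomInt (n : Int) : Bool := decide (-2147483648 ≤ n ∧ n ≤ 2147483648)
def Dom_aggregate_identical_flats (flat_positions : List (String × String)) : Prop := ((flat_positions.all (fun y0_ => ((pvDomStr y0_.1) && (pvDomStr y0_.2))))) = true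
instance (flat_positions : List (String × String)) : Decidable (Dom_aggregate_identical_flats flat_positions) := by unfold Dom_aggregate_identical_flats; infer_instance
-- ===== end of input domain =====

-- B replaces A's inner scan over the whole dict by a value->keys hash index built once,
-- pairing each key inside its equal-value group only (A mutates its argument in place;
-- the equivalence proved here is about the return value).


-- ===== PORT A =====
-- inner 'for key2, val2 in flat_positions.items(): …' loop of A
def aggA_inner (fp : List (String × String)) (kv1 : String × String)
    (st : PySem.Set String × PySem.Dict String String) :
    PySem.Set String × PySem.Dict String String :=
  fp.foldl (fun st2 kv2 =>
    if decide (kv2.1 ≤ kv1.1) || PySem.Set.contains st2.1 kv2.1 then st2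
    else if kv1.2 == kv2.2 then
      (PySem.Set.add (PySem.Set.add st2.1 kv1.1) kv2.1,
       st2.2.insert (PySem.Str.join "+" [kv1.1, kv2.1]) kv1.2)
    else st2) st

def aggregate_identical_flats (flat_positions : List (String × String)) : List (String × String) :=
  let st := flat_positions.foldl
    (fun (st : PySem.Set String × PySem.Dict String String) kv1 =>
      if PySem.Set.contains st.1 kv1.1 then st else aggA_inner flat_positions kv1 st)
    (PySem.Set.empty, PySem.Dict.empty)
  -- 'for key in flats_to_delete: del flat_positions[key]' — the final dict does not
  -- depend on the set's iteration order (erasures of distinct keys commute)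
  let d1 := st.1.foldl (fun (d : PySem.Dict String String) k => d.erase k)
    (PySem.Dict.ofList flat_positions)
  (d1.update st.2.items).items

-- ===== PORT B =====
-- 'groups.setdefault(val, []).append(key)' pass of Source B
def aggB_groups (items : List (String × String)) : PySem.Dict String (List String) :=
  items.foldl (fun g kv => g.modify kv.2 [] (· ++ [kv.1])) PySem.Dict.empty

-- body of Source B's 'for key1, val in items:' loop; 'groups[val]' is ported as getD with
-- default [] (key1's own value is always a key of groups, so the lookup never fails)
def aggB_step (groups : PySem.Dict String (List String))
    (st : PySem.Set String × List (String × String)) (kv1 : String × String) :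
    PySem.Set String × List (String × String) :=
  if PySem.Set.contains st.1 kv1.1 then st
  else
    let partners := (groups.getD kv1.2 []).filter
        (fun k2 => !(PySem.Set.contains st.1 k2) && decide (kv1.1 < k2))
    if partners.isEmpty then st
    else partners.foldl
        (fun acc k2 => (PySem.Set.add acc.1 k2,
                        acc.2 ++ [(PySem.Str.join "+" [kv1.1, k2], kv1.2)]))
        (PySem.Set.add st.1 kv1.1, st.2)

def aggregate_identical_flats_alt (flat_positions : List (String × String)) : List (String × String) :=
  let groups := aggB_groups flat_positions
  let st := flat_positions.foldl (aggB_step groups) (PySem.Set.empty, [])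
  let surv := flat_positions.filter (fun kv => !(PySem.Set.contains st.1 kv.1))
  (st.2.foldl (fun (d : PySem.Dict String String) p => d.insert p.1 p.2)
    (PySem.Dict.ofList surv)).items

-- ===== PRECONDITION & SPEC =====
-- Pre_ excludes lists with duplicate keys: both Pythons take a dict, which cannot hold
-- a duplicate key, so such lists do not represent any actual input of A.
def Pre_aggregate_identical_flats (flat_positions : List (String × String)) : Prop :=
  (flat_positions.map (·.1)).Nodup
instance (flat_positions : List (String × String)) : Decidable (Pre_aggregate_identical_flats flat_positions) := by unfold Pre_aggregate_identical_flats; infer_instance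

def pvWitness_aggregate_identical_flats : (List (String × String)) :=
  [("a", "52.1,13.4"), ("b", "52.1,13.4"), ("c", "48.1,11.6")]

def Spec_aggregate_identical_flats (flat_positions : List (String × String)) (out : List (String × String)) : Prop := out = aggregate_identical_flats_alt flat_positions
instance (flat_positions : List (String × String)) (out : List (String × String)) : Decidable (Spec_aggregate_identical_flats flat_positions out) := by unfold Spec_aggregate_identical_flats; infer_instance

-- ===== CLAIM (what is proved, stated in full; the proofs are below) =====
def Claim_equal_aggregate_identical_flats : Prop := ∀ (flat_positions : List (String × String)), Dom_aggregate_identical_flats flat_positions → Pre_aggregate_identical_flats flat_positions → Spec_aggregate_identical_flats flat_positions (aggregate_identical_flats flat_positions)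


-- ===== LEMMAS AND PROOFS =====

theorem bnot_true {b : Bool} (h : (!b) = true) : b = false := by
  cases b with
  | false => rfl
  | true => exact absurd h (by decide)

-- A's inner loop = one filter over the dict items (the keys matched along the way are
-- fresh, so the evolving delete-set never changes a later test of the same inner pass)
theorem innerChar (kv1 : String × String) :
    ∀ (l : List (String × String)) (del : PySem.Set String) (ne : PySem.Dict String String),
    (l.map (·.1)).Nodup →
    aggA_inner l kv1 (del, ne) =
      (((l.filter (fun kv2 => !(decide (kv2.1 ≤ kv1.1) || PySem.Set.contains del kv2.1) && (kv1.2 == kv2.2))).foldl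
          (fun s kv2 => PySem.Set.add (PySem.Set.add s kv1.1) kv2.1) del),
       ((l.filter (fun kv2 => !(decide (kv2.1 ≤ kv1.1) || PySem.Set.contains del kv2.1) && (kv1.2 == kv2.2))).foldl
          (fun n kv2 => n.insert (PySem.Str.join "+" [kv1.1, kv2.1]) kv1.2) ne)) := by
  intro l
  induction l with
  | nil => intro del ne _; rfl
  | cons kv l ih =>
    intro del ne hn
    have hn' : (l.map (·.1)).Nodup := (List.nodup_cons.mp hn).2
    have hkv : kv.1 ∉ l.map (·.1) := (List.nodup_cons.mp hn).1
    by_cases hg : (decide (kv.1 ≤ kv1.1) || PySem.Set.contains del kv.1) = true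
    · simp only [aggA_inner, List.foldl_cons, List.filter_cons, hg, Bool.not_true,
        Bool.false_and, reduceIte]
      simpa only [aggA_inner] using ih del ne hn'
    · rw [Bool.not_eq_true] at hg
      by_cases hv : (kv1.2 == kv.2) = true
      · simp only [aggA_inner, List.foldl_cons, List.filter_cons, hg, hv, Bool.not_false,
          Bool.true_and, reduceIte, Bool.false_eq_true, if_false]
        have ihh := ih (PySem.Set.add (PySem.Set.add del kv1.1) kv.1)
          (ne.insert (PySem.Str.join "+" [kv1.1, kv.1]) kv1.2) hn'
        simp only [aggA_inner] at ihh
        rw [ihh]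
        have hfc : l.filter (fun kv2 => !(decide (kv2.1 ≤ kv1.1) ||
              PySem.Set.contains (PySem.Set.add (PySem.Set.add del kv1.1) kv.1) kv2.1) && (kv1.2 == kv2.2))
            = l.filter (fun kv2 => !(decide (kv2.1 ≤ kv1.1) || PySem.Set.contains del kv2.1) && (kv1.2 == kv2.2)) := by
          apply List.filter_congr
          intro kv2 hm
          by_cases hle : (kv2.1 ≤ kv1.1)
          · simp [hle]
          · have hne1 : kv2.1 ≠ kv1.1 := fun h => hle (le_of_eq h)
            have hne2 : kv2.1 ≠ kv.1 := fun h => hkv (h ▸ List.mem_map_of_mem hm)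
            simp [hle, hne1, hne2]
        rw [hfc]
      · rw [Bool.not_eq_true] at hv
        simp only [aggA_inner, List.foldl_cons, List.filter_cons, hg, hv, Bool.not_false,
          Bool.true_and, Bool.false_eq_true, if_false]
        simpa only [aggA_inner] using ih del ne hn'

-- the consumed-set updates of one matching pass, written as a plain append
theorem setFoldAppend2 (k1 : String) :
    ∀ (ms : List (String × String)) (del : PySem.Set String),
    k1 ∈ del → (∀ kv ∈ ms, kv.1 ∉ del) → (ms.map (·.1)).Nodup →
    ms.foldl (fun s kv2 => PySem.Set.add (PySem.Set.add s k1) kv2.1) del = del ++ ms.map (·.1) := by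
  intro ms
  induction ms with
  | nil => intro del _ _ _; simp
  | cons kv ms ih =>
    intro del hk1 hfresh hnd
    have h1 : PySem.Set.add del k1 = del := PySem.Set.add_of_mem hk1
    have h2 : PySem.Set.add del kv.1 = del ++ [kv.1] :=
      PySem.Set.add_of_not_mem (hfresh kv (List.mem_cons_self))
    simp only [List.foldl_cons, h1, h2]
    rw [ih (del ++ [kv.1]) (by simp [hk1])
      (by intro q hq; simp only [List.mem_append, List.mem_singleton]
          rintro (h | h)
          · exact hfresh q (List.mem_cons_of_mem _ hq) h
          · exact (List.nodup_cons.mp hnd).1 (List.mem_map.mpr ⟨q, hq, h⟩))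
      (List.nodup_cons.mp hnd).2]
    simp

theorem setFoldAppend (k1 : String) (ms : List (String × String)) (del : PySem.Set String)
    (hk1 : k1 ∉ del) (hfresh : ∀ kv ∈ ms, kv.1 ∉ del) (hne : ∀ kv ∈ ms, kv.1 ≠ k1)
    (hnd : (ms.map (·.1)).Nodup) (hms : ms ≠ []) :
    ms.foldl (fun s kv2 => PySem.Set.add (PySem.Set.add s k1) kv2.1) del
      = del ++ k1 :: ms.map (·.1) := by
  cases ms with
  | nil => exact absurd rfl hms
  | cons kv ms =>
    have h1 : PySem.Set.add del k1 = del ++ [k1] := PySem.Set.add_of_not_mem hk1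
    have h2 : PySem.Set.add (del ++ [k1]) kv.1 = del ++ [k1] ++ [kv.1] :=
      PySem.Set.add_of_not_mem (by
        simp only [List.mem_append, List.mem_singleton]
        rintro (h | h)
        · exact hfresh kv List.mem_cons_self h
        · exact hne kv List.mem_cons_self h)
    simp only [List.foldl_cons, h1, h2]
    rw [setFoldAppend2 k1 ms (del ++ [k1] ++ [kv.1]) (by simp)
      (by intro q hq
          simp only [List.mem_append, List.mem_singleton]
          rintro ((h | h) | h)
          · exact hfresh q (List.mem_cons_of_mem _ hq) h
          · exact hne q (List.mem_cons_of_mem _ hq) h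
          · exact (List.nodup_cons.mp hnd).1 (List.mem_map.mpr ⟨q, hq, h⟩))
      (List.nodup_cons.mp hnd).2]
    simp

-- Source B's value->keys index: groups[v] is exactly the keys of value v, in order
theorem groupsChar (items : List (String × String)) (v : String) :
    (aggB_groups items).getD v []
      = (items.filter (fun kv => kv.2 == v)).map (·.1) := by
  have h0 : aggB_groups items
      = (items.map (fun kv => (kv.2, kv.1))).foldl
          (fun d p => d.modify p.1 [] (· ++ [p.2])) PySem.Dict.empty := by
    rw [List.foldl_map]; rfl
  rw [h0, PySem.Dict.getD_foldl_modify_append]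
  rw [show (PySem.Dict.empty : PySem.Dict String (List String)).getD v [] = [] from rfl]
  rw [List.filter_map, List.map_map]
  simp [Function.comp_def]

-- B's partner list is the key list of A's inner-loop match list
theorem partnersChar (fp : List (String × String)) (kv1 : String × String)
    (del : PySem.Set String) :
    ((aggB_groups fp).getD kv1.2 []).filter
        (fun k2 => !(PySem.Set.contains del k2) && decide (kv1.1 < k2))
      = (fp.filter (fun kv2 => !(decide (kv2.1 ≤ kv1.1) || PySem.Set.contains del kv2.1) && (kv1.2 == kv2.2))).map (·.1) := by
  rw [groupsChar, List.filter_map, List.filter_filter]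
  apply congrArg (List.map _)
  apply List.filter_congr
  intro kv2 _
  apply Bool.eq_iff_iff.mpr
  simp only [Function.comp_def, Bool.and_eq_true, Bool.not_eq_true', Bool.or_eq_false_iff,
    beq_iff_eq, decide_eq_true_eq, decide_eq_false_iff_not, not_le]
  exact ⟨fun ⟨⟨a, b⟩, c⟩ => ⟨⟨b, a⟩, c.symm⟩, fun ⟨⟨a, b⟩, c⟩ => ⟨⟨b, a⟩, c.symm⟩⟩

-- inserting at a key already present commutes with inserting at a different key
theorem insert_comm_of_contains (E : PySem.Dict String String) (q1 : String) (q2 : String)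
    (k : String) (v : String) (hq : q1 ≠ k) (hk : E.contains k = true) :
    (E.insert q1 q2).insert k v = (E.insert k v).insert q1 q2 := by
  have hbq : (k == q1) = false := beq_eq_false_iff_ne.mpr (Ne.symm hq)
  have hbq' : (q1 == k) = false := beq_eq_false_iff_ne.mpr hq
  have hk1 : (E.insert q1 q2).contains k = true := by
    rw [PySem.Dict.contains_insert, hbq, hk, Bool.false_or]
  apply PySem.Dict.ext
  by_cases hcq : E.contains q1 = true
  · have hq1 : (E.insert k v).contains q1 = true := by
      rw [PySem.Dict.contains_insert, hbq', hcq, Bool.or_true]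
    rw [PySem.Dict.items_insert_of_contains _ v hk1,
      PySem.Dict.items_insert_of_contains _ q2 hcq,
      PySem.Dict.items_insert_of_contains _ q2 hq1,
      PySem.Dict.items_insert_of_contains _ v hk,
      List.map_map, List.map_map]
    apply List.map_congr_left
    intro p _
    by_cases h1 : (p.1 == q1) = true
    · have hp1 : p.1 = q1 := beq_iff_eq.mp h1
      simp [hp1, hq]
    · have h1' : p.1 ≠ q1 := by simpa using h1
      by_cases h2 : (p.1 == k) = true
      · have h2' : p.1 = k := beq_iff_eq.mp h2
        simp [h2', Ne.symm hq]
      · have h2' : p.1 ≠ k := by simpa using h2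
        simp [h1', h2']
  · have hcq' : E.contains q1 = false := by simpa using hcq
    have hq1 : (E.insert k v).contains q1 = false := by
      rw [PySem.Dict.contains_insert, hbq', hcq', Bool.or_false]
    rw [PySem.Dict.items_insert_of_contains _ v hk1,
      PySem.Dict.items_insert_of_not_contains _ q2 hcq',
      PySem.Dict.items_insert_of_not_contains _ q2 hq1,
      PySem.Dict.items_insert_of_contains _ v hk,
      List.map_append]
    simp [hq]

-- d[k] = v commutes past updates whose keys avoid k, when k is already present
theorem update_insert_of_contains :
    ∀ (l2 : List (String × String)) (E : PySem.Dict String String) (k : String) (v : String),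
    E.contains k = true → (∀ q ∈ l2, q.1 ≠ k) →
    (E.update l2).insert k v = (E.insert k v).update l2 := by
  intro l2
  induction l2 with
  | nil => intro E k v _ _; rfl
  | cons q l2 ih =>
    intro E k v hk hq
    have h1 : (E.insert q.1 q.2).contains k = true := by
      rw [PySem.Dict.contains_insert, hk, Bool.or_true]
    calc (E.update (q :: l2)).insert k v
        = ((E.insert q.1 q.2).update l2).insert k v := rfl
      _ = ((E.insert q.1 q.2).insert k v).update l2 :=
          ih _ k v h1 (fun p hp => hq p (List.mem_cons_of_mem _ hp))
      _ = ((E.insert k v).insert q.1 q.2).update l2 := by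
          rw [insert_comm_of_contains E q.1 q.2 k v (hq q List.mem_cons_self) hk]
      _ = (E.insert k v).update (q :: l2) := rfl

theorem dict_update_append (D : PySem.Dict String String) (a b : List (String × String)) :
    D.update (a ++ b) = (D.update a).update b := by
  simp [PySem.Dict.update, List.foldl_append]

-- updating with the items of e.insert k v = updating with e's items, then the insert
theorem update_items_insert (e : PySem.Dict String String) (d : PySem.Dict String String)
    (k : String) (v : String) (hnd : e.keys.Nodup) :
    d.update ((e.insert k v).items) = (d.update e.items).insert k v := by
  by_cases hc : e.contains k = true
  · have hmem : k ∈ e.items.map (·.1) := (PySem.Dict.contains_iff_mem_keys e k).mp hc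
    obtain ⟨p, hp, hpk⟩ := List.exists_of_mem_map hmem
    obtain ⟨l1, l2, hitems⟩ := List.append_of_mem hp
    have hnd' : ((l1 ++ p :: l2).map (·.1)).Nodup := by
      have hkeys : e.keys = e.items.map (·.1) := rfl
      rw [hkeys, hitems] at hnd; exact hnd
    rw [List.map_append, List.map_cons] at hnd'
    have hsplit := List.nodup_append.mp hnd'
    have hk1 : ∀ q ∈ l1, q.1 ≠ k := by
      intro q hq h
      exact hsplit.2.2 q.1 (List.mem_map_of_mem hq) q.1 (by rw [h, ← hpk]; exact List.mem_cons_self) rfl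
    have hk2 : ∀ q ∈ l2, q.1 ≠ k := by
      intro q hq h
      exact (List.nodup_cons.mp hsplit.2.1).1 (by
        rw [hpk, ← h]; exact List.mem_map_of_mem hq)
    have hmap : (e.insert k v).items = l1 ++ (k, v) :: l2 := by
      rw [PySem.Dict.items_insert_of_contains _ v hc, hitems, List.map_append, List.map_cons]
      congr 1
      · calc l1.map (fun p => if (p.1 == k) = true then (k, v) else p)
            = l1.map id := List.map_congr_left
              (fun q hq => by simp [beq_eq_false_iff_ne.mpr (hk1 q hq)])
          _ = l1 := List.map_id _
      · congr 1
        · simp [hpk]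
        · calc l2.map (fun p => if (p.1 == k) = true then (k, v) else p)
              = l2.map id := List.map_congr_left
                (fun q hq => by simp [beq_eq_false_iff_ne.mpr (hk2 q hq)])
            _ = l2 := List.map_id _
    have hupd : ∀ (D : PySem.Dict String String) (q : String × String) l,
        D.update (q :: l) = (D.insert q.1 q.2).update l := fun _ _ _ => rfl
    rw [hmap, hitems, dict_update_append, dict_update_append, hupd, hupd]
    show ((d.update l1).insert k v).update l2
        = (((d.update l1).insert p.1 p.2).update l2).insert k v
    rw [update_insert_of_contains l2 ((d.update l1).insert p.1 p.2) k v
        (by rw [hpk]; exact PySem.Dict.contains_insert_self _ _ _) hk2,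
      hpk, PySem.Dict.insert_insert_self]
  · have hc' : e.contains k = false := by simpa using hc
    rw [PySem.Dict.items_insert_of_not_contains _ v hc']
    exact dict_update_append d e.items [(k, v)]

-- dict.update(e) where e was built by inserts = folding those inserts in directly
theorem update_items_update :
    ∀ (pl : List (String × String)) (e d : PySem.Dict String String), e.keys.Nodup →
    d.update ((e.update pl).items) = (d.update e.items).update pl := by
  intro pl
  induction pl with
  | nil => intro e d _; rfl
  | cons p pl ih =>
    intro e d hnd
    calc d.update ((e.update (p :: pl)).items)
        = d.update (((e.insert p.1 p.2).update pl).items) := rfl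
      _ = (d.update (e.insert p.1 p.2).items).update pl :=
          ih _ d (PySem.Dict.nodup_keys_insert _ _ _ hnd)
      _ = ((d.update e.items).insert p.1 p.2).update pl := by
          rw [update_items_insert _ _ _ _ hnd]
      _ = (d.update e.items).update (p :: pl) := rfl

theorem update_ofList_items (pl : List (String × String)) (d : PySem.Dict String String) :
    d.update ((PySem.Dict.ofList pl).items) = d.update pl := by
  have h := update_items_update pl PySem.Dict.empty d PySem.Dict.nodup_keys_empty
  simpa using h

-- with distinct keys, dict(items) keeps the items list as it is
theorem ofList_eq_mk (fp : List (String × String)) (hn : (fp.map (·.1)).Nodup) :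
    PySem.Dict.ofList fp = PySem.Dict.mk fp := by
  apply PySem.Dict.ext
  have h := PySem.Dict.items_foldl_insert_fresh fp (fun a => a.1) (fun a => a.2)
    PySem.Dict.empty (fun a _ => rfl) hn
  calc (PySem.Dict.ofList fp).items
      = (fp.foldl (fun d a => d.insert a.1 a.2) PySem.Dict.empty).items := rfl
    _ = PySem.Dict.empty.items ++ fp.map (fun a => (a.1, a.2)) := h
    _ = fp := by
      rw [show (PySem.Dict.empty : PySem.Dict String String).items = [] from rfl]
      simp

-- the deletion loop over any key list is one filter pass over the items
theorem eraseFold :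
    ∀ (ks : List String) (l : List (String × String)),
    ks.foldl (fun (d : PySem.Dict String String) k => d.erase k) (PySem.Dict.mk l)
      = PySem.Dict.mk (l.filter (fun p => !(List.contains ks p.1))) := by
  intro ks
  induction ks with
  | nil => intro l; simp
  | cons k ks ih =>
    intro l
    calc (k :: ks).foldl (fun (d : PySem.Dict String String) k => d.erase k) (PySem.Dict.mk l)
        = ks.foldl (fun (d : PySem.Dict String String) k => d.erase k)
            (PySem.Dict.mk (l.filter (fun p => !(p.1 == k)))) := rfl
      _ = PySem.Dict.mk ((l.filter (fun p => !(p.1 == k))).filter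
            (fun p => !(List.contains ks p.1))) := ih _
      _ = PySem.Dict.mk (l.filter (fun p => !(List.contains (k :: ks) p.1))) := by
          rw [List.filter_filter]
          congr 1
          apply List.filter_congr
          intro p _
          rw [List.contains_cons, Bool.not_or, Bool.and_comm]

-- the two outer loops stay in lock-step: same consumed set, and A's new_entries dict
-- is the dict of B's new_entries list
theorem outerEq (fp : List (String × String)) (hn : (fp.map (·.1)).Nodup) :
    ∀ (l : List (String × String)) (del : PySem.Set String) (pl : List (String × String)),
    l.foldl (fun (st : PySem.Set String × PySem.Dict String String) kv1 =>
        if PySem.Set.contains st.1 kv1.1 then st else aggA_inner fp kv1 st)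
      (del, PySem.Dict.ofList pl)
    = ((l.foldl (aggB_step (aggB_groups fp)) (del, pl)).1,
       PySem.Dict.ofList ((l.foldl (aggB_step (aggB_groups fp)) (del, pl)).2)) := by
  intro l
  induction l with
  | nil => intro del pl; rfl
  | cons kv1 l ih =>
    intro del pl
    rw [List.foldl_cons, List.foldl_cons]
    by_cases hdel : PySem.Set.contains del kv1.1 = true
    · have hA : (if PySem.Set.contains (del, PySem.Dict.ofList pl).1 kv1.1 then
            (del, PySem.Dict.ofList pl) else aggA_inner fp kv1 (del, PySem.Dict.ofList pl))
          = (del, PySem.Dict.ofList pl) := if_pos hdel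
      have hB : aggB_step (aggB_groups fp) (del, pl) kv1 = (del, pl) := if_pos hdel
      rw [hA, hB]
      exact ih del pl
    · have hdel' : PySem.Set.contains del kv1.1 = false := by simpa using hdel
      have hA : (if PySem.Set.contains (del, PySem.Dict.ofList pl).1 kv1.1 then
            (del, PySem.Dict.ofList pl) else aggA_inner fp kv1 (del, PySem.Dict.ofList pl))
          = aggA_inner fp kv1 (del, PySem.Dict.ofList pl) := if_neg hdel
      rw [hA, innerChar kv1 fp del (PySem.Dict.ofList pl) hn]
      have hpart := partnersChar fp kv1 del
      set ms := fp.filter (fun kv2 =>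
        !(decide (kv2.1 ≤ kv1.1) || PySem.Set.contains del kv2.1) && (kv1.2 == kv2.2)) with hms
      have hmsub : ms.Sublist fp := hms ▸ List.filter_sublist
      have hmnd : (ms.map (·.1)).Nodup := (hmsub.map (·.1)).nodup hn
      have hmfresh : ∀ kv ∈ ms, kv.1 ∉ del := by
        intro kv hkv hmem
        have hf := List.of_mem_filter hkv
        rcases Bool.and_eq_true_iff.mp hf with ⟨h1, _⟩
        rcases Bool.or_eq_false_iff.mp (bnot_true h1) with ⟨_, h3⟩
        rw [(PySem.Set.contains_iff _ _).mpr hmem] at h3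
        exact absurd h3 (by decide)
      have hmne : ∀ kv ∈ ms, kv.1 ≠ kv1.1 := by
        intro kv hkv h
        have hf := List.of_mem_filter hkv
        rcases Bool.and_eq_true_iff.mp hf with ⟨h1, _⟩
        rcases Bool.or_eq_false_iff.mp (bnot_true h1) with ⟨h2, _⟩
        have h2' : ¬ (kv.1 ≤ kv1.1) := of_decide_eq_false h2
        exact h2' (le_of_eq h)
      have hk1del : kv1.1 ∉ del := by
        intro hmem
        rw [(PySem.Set.contains_iff _ _).mpr hmem] at hdel'
        exact absurd hdel' (by decide)
      have hBshow : aggB_step (aggB_groups fp) (del, pl) kv1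
          = (if (((aggB_groups fp).getD kv1.2 []).filter
                (fun k2 => !(PySem.Set.contains del k2) && decide (kv1.1 < k2))).isEmpty
             then (del, pl)
             else (((aggB_groups fp).getD kv1.2 []).filter
                (fun k2 => !(PySem.Set.contains del k2) && decide (kv1.1 < k2))).foldl
                (fun acc k2 => (PySem.Set.add acc.1 k2,
                  acc.2 ++ [(PySem.Str.join "+" [kv1.1, k2], kv1.2)]))
                (PySem.Set.add del kv1.1, pl)) := if_neg hdel
      by_cases hempty : ms = []
      · have hBstep : aggB_step (aggB_groups fp) (del, pl) kv1 = (del, pl) := by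
          rw [hBshow, hpart, hempty]
          rfl
        rw [hBstep, hempty, List.foldl_nil, List.foldl_nil]
        exact ih del pl
      · have hnotempty : ((ms.map (·.1)).isEmpty) = false := by
          simp [hempty]
        have hBstep : aggB_step (aggB_groups fp) (del, pl) kv1
            = (del ++ kv1.1 :: ms.map (·.1),
               pl ++ ms.map (fun kv2 => (PySem.Str.join "+" [kv1.1, kv2.1], kv1.2))) := by
          rw [hBshow, hpart, if_neg (by simp [hnotempty])]
          rw [PySem.List.foldl_prod_mk PySem.Set.add
            (fun acc k2 => acc ++ [(PySem.Str.join "+" [kv1.1, k2], kv1.2)])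
            (ms.map (·.1)) (PySem.Set.add del kv1.1) pl]
          congr 1
          · rw [PySem.Set.add_of_not_mem hk1del]
            rw [show List.foldl PySem.Set.add (del ++ [kv1.1]) (ms.map (·.1))
                = PySem.Set.update (del ++ [kv1.1]) (ms.map (·.1)) from rfl]
            rw [PySem.Set.update_eq_append_of_disjoint _ _ hmnd (by
              intro x hx
              obtain ⟨kv, hkv, rfl⟩ := List.exists_of_mem_map hx
              simp only [List.mem_append, List.mem_singleton]
              rintro (h | h)
              · exact hmfresh kv hkv h
              · exact hmne kv hkv h)]
            simp
          · rw [PySem.List.foldl_append_singleton_eq_map, List.map_map]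
            rfl
        have hsetA : ms.foldl (fun s kv2 => PySem.Set.add (PySem.Set.add s kv1.1) kv2.1) del
            = del ++ kv1.1 :: ms.map (·.1) :=
          setFoldAppend kv1.1 ms del hk1del hmfresh hmne hmnd hempty
        have hneA : ms.foldl (fun n kv2 => n.insert (PySem.Str.join "+" [kv1.1, kv2.1]) kv1.2)
              (PySem.Dict.ofList pl)
            = PySem.Dict.ofList (pl ++ ms.map (fun kv2 => (PySem.Str.join "+" [kv1.1, kv2.1], kv1.2))) := by
          have h2 : PySem.Dict.ofList (pl ++ ms.map (fun kv2 => (PySem.Str.join "+" [kv1.1, kv2.1], kv1.2)))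
              = (PySem.Dict.ofList pl).update
                  (ms.map (fun kv2 => (PySem.Str.join "+" [kv1.1, kv2.1], kv1.2))) :=
            dict_update_append PySem.Dict.empty pl _
          rw [h2, show (PySem.Dict.ofList pl).update
                (ms.map (fun kv2 => (PySem.Str.join "+" [kv1.1, kv2.1], kv1.2)))
              = List.foldl (fun acc p => acc.insert p.1 p.2) (PySem.Dict.ofList pl)
                (ms.map (fun kv2 => (PySem.Str.join "+" [kv1.1, kv2.1], kv1.2))) from rfl,
            List.foldl_map]
        rw [hsetA, hneA, hBstep]
        exact ih (del ++ kv1.1 :: ms.map (·.1))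
          (pl ++ ms.map (fun kv2 => (PySem.Str.join "+" [kv1.1, kv2.1], kv1.2)))


-- ===== VERDICT (by name: the statement is the Claim_ definition above) =====
theorem aggregate_identical_flats_spec : Claim_equal_aggregate_identical_flats := by
  intro fp _ hpre
  have hn : (fp.map (·.1)).Nodup := hpre
  show aggregate_identical_flats fp = aggregate_identical_flats_alt fp
  simp only [aggregate_identical_flats, aggregate_identical_flats_alt]
  rw [show (PySem.Dict.empty : PySem.Dict String String) = PySem.Dict.ofList [] from rfl]
  rw [outerEq fp hn fp PySem.Set.empty []]
  set S := fp.foldl (aggB_step (aggB_groups fp)) (PySem.Set.empty, []) with hS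
  have hsurvnd : ((fp.filter (fun kv => !(PySem.Set.contains S.1 kv.1))).map (·.1)).Nodup := by
    have hs : (fp.filter (fun kv => !(PySem.Set.contains S.1 kv.1))).Sublist fp :=
      List.filter_sublist
    exact (hs.map _).nodup hn
  rw [ofList_eq_mk fp hn]
  rw [show ((S.1, PySem.Dict.ofList S.2) : PySem.Set String × PySem.Dict String String).1
      = S.1 from rfl,
    show ((S.1, PySem.Dict.ofList S.2) : PySem.Set String × PySem.Dict String String).2
      = PySem.Dict.ofList S.2 from rfl]
  rw [eraseFold S.1 fp, update_ofList_items, ofList_eq_mk _ hsurvnd]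
  rfl
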